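-- pv_equiv track=rewrite | github.com/Luisfmillanr/Algoritmo_Ordenacion | Solucion_Luis_Fernando_Millan.py | verificar_ordenacion
-- ===== SOURCE A (Python) =====
-- def verificar_ordenacion(original, ordenada):
--     if len(original) != len(ordenada):
--         return False
--     original_copy = original[:]
--     anterior = None
--     for elemento in ordenada:
--         if anterior is not None and elemento < anterior:
--             return False
--         if elemento in original_copy:
--             original_copy.remove(elemento)
--         else:
--             return False
--         anterior = elemento
--     return not original_copy
-- ===== SOURCE B (Python) =====
-- def verificar_ordenacion(original, ordenada):
--     return ordenada == sorted(original)
-- ===== Notes on version B (the rewrite author's own statement) =====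
-- stated objective: simpler
-- what changed: Replaces A's adjacent-comparison scan with per-element multiset removal by building sorted(original) once and returning a single list equality.
import Mathlib
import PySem

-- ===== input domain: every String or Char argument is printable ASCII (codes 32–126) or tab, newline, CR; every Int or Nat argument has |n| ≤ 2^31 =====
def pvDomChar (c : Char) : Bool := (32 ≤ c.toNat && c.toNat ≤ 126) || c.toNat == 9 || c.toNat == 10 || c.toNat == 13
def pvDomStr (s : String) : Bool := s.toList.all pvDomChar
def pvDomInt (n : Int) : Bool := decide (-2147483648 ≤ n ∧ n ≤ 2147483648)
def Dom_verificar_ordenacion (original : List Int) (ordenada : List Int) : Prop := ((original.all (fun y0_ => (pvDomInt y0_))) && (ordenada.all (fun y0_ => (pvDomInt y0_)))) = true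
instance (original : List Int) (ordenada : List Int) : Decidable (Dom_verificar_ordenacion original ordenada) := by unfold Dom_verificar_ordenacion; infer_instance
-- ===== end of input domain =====

-- B replaces A's sorted-scan-with-multiset-removal loop by one sort and one equality check (simpler).


-- ===== PORT A =====
-- the for-loop over `ordenada` with state (original_copy, anterior)
def voLoop (copy : List Int) (anterior : Option Int) : List Int → Bool
  | [] => copy.isEmpty
  | elemento :: rest =>
    if (match anterior with | some a => decide (elemento < a) | none => false) then false
    else
      match PySem.List.remove? copy elemento with   -- `elemento in original_copy` + `.remove`
      | some copy' => voLoop copy' (some elemento) rest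
      | none => false

def verificar_ordenacion (original : List Int) (ordenada : List Int) : Bool :=
  if original.length ≠ ordenada.length then false
  else voLoop original none ordenada

-- ===== PORT B =====
def verificar_ordenacion_alt (original : List Int) (ordenada : List Int) : Bool :=
  decide (ordenada = PySem.List.sorted original (fun x => x) false)

-- ===== PRECONDITION & SPEC =====
def Spec_verificar_ordenacion (original : List Int) (ordenada : List Int) (out : Bool) : Prop := out = verificar_ordenacion_alt original ordenada
instance (original : List Int) (ordenada : List Int) (out : Bool) : Decidable (Spec_verificar_ordenacion original ordenada out) := by unfold Spec_verificar_ordenacion; infer_instance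

-- ===== CLAIM (what is proved, stated in full; the proofs are below) =====
def Claim_equal_verificar_ordenacion : Prop := ∀ (original : List Int) (ordenada : List Int), Dom_verificar_ordenacion original ordenada → Spec_verificar_ordenacion original ordenada (verificar_ordenacion original ordenada)

-- ===== LEMMAS AND PROOFS =====

-- invariant of A's loop: it succeeds iff the remaining suffix is a nondecreasing
-- permutation of the remaining multiset, and its head does not drop below `anterior`
theorem voLoop_eq_true_iff (rest : List Int) : ∀ (copy : List Int) (anterior : Option Int),
    voLoop copy anterior rest = true ↔
      rest.Perm copy ∧ rest.Pairwise (· ≤ ·) ∧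
        (∀ a, anterior = some a → ∀ x ∈ rest, a ≤ x) := by
  induction rest with
  | nil =>
    intro copy anterior
    simp only [voLoop, List.isEmpty_iff, List.nil_perm]
    constructor
    · rintro rfl; simp
    · rintro ⟨rfl, -, -⟩; rfl
  | cons e t ih =>
    intro copy anterior
    have core : ∀ copy : List Int,
        (match PySem.List.remove? copy e with
         | some copy' => voLoop copy' (some e) t
         | none => false) = true ↔
          (e :: t).Perm copy ∧ (e :: t).Pairwise (· ≤ ·) := by
      intro copy
      by_cases hmem : e ∈ copy
      · rw [PySem.List.remove?_eq_some_erase copy e hmem]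
        simp only [ih]
        constructor
        · rintro ⟨hperm, hpw, hhd⟩
          exact ⟨List.cons_perm_iff_perm_erase.mpr ⟨hmem, hperm⟩,
            List.Pairwise.cons (fun x hx => hhd e rfl x hx) hpw⟩
        · rintro ⟨hperm, hpw⟩
          rcases List.pairwise_cons.mp hpw with ⟨hhead, hpwt⟩
          exact ⟨(List.cons_perm_iff_perm_erase.mp hperm).2, hpwt,
            by rintro a ha x hx; rw [Option.some_inj] at ha; subst ha; exact hhead x hx⟩
      · rw [(PySem.List.remove?_eq_none_iff copy e).mpr hmem]
        simp only [Bool.false_eq_true, false_iff]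
        rintro ⟨hperm, -⟩
        exact hmem (hperm.subset (by simp))
    cases anterior with
    | none =>
      simp only [voLoop, Bool.false_eq_true, if_false, core copy]
      simp
    | some a =>
      by_cases hea : e < a
      · simp only [voLoop, hea, decide_true, if_true, Bool.false_eq_true, false_iff]
        rintro ⟨-, -, hant⟩
        exact absurd (hant a rfl e (by simp)) (by omega)
      · simp only [voLoop, decide_eq_true_eq, if_neg hea, core copy]
        constructor
        · rintro ⟨hperm, hpw⟩
          refine ⟨hperm, hpw, ?_⟩
          rintro b hb x hx
          rw [Option.some_inj] at hb; subst hb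
          rcases List.mem_cons.mp hx with rfl | hx
          · omega
          · have := (List.pairwise_cons.mp hpw).1 x hx
            omega
        · rintro ⟨hperm, hpw, -⟩
          exact ⟨hperm, hpw⟩

theorem verificar_eq_true_iff (original ordenada : List Int) :
    verificar_ordenacion original ordenada = true ↔
      ordenada.Perm original ∧ ordenada.Pairwise (· ≤ ·) := by
  unfold verificar_ordenacion
  split_ifs with hlen
  · constructor
    · intro h; exact absurd h (by simp)
    · rintro ⟨hperm, -⟩; exact absurd hperm.length_eq.symm hlen
  · rw [voLoop_eq_true_iff]
    simp

theorem alt_eq_true_iff (original ordenada : List Int) :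
    verificar_ordenacion_alt original ordenada = true ↔
      ordenada.Perm original ∧ ordenada.Pairwise (· ≤ ·) := by
  unfold verificar_ordenacion_alt
  rw [decide_eq_true_eq]
  constructor
  · rintro rfl
    exact ⟨PySem.List.sorted_perm original (fun x => x) false,
      PySem.List.sorted_pairwise original (fun x => x)⟩
  · rintro ⟨hperm, hpw⟩
    exact (PySem.List.sorted_id_eq_of_perm_of_pairwise original ordenada hperm hpw).symm

-- ===== VERDICT (by name: the statement is the Claim_ definition above) =====
theorem verificar_ordenacion_spec : Claim_equal_verificar_ordenacion := by
  intro original ordenada _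
  unfold Spec_verificar_ordenacion
  rw [Bool.eq_iff_iff, verificar_eq_true_iff, alt_eq_true_iff]
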